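-- pv_equiv track=rewrite | github.com/langbot-app/langbot-plugin-demo | SimpleRAGEngine/components/rag_engine/chunker.py | _split_by_separator
-- ===== SOURCE A (Python) =====
-- def _split_by_separator(text: str, separator: str) -> list[str]:
--     """Split *text* by *separator*, keeping the separator attached to the left piece."""
--     if separator == "":
--         return list(text)
--
--     parts = text.split(separator)
--     result: list[str] = []
--     for piece in parts[:-1]:
--         if piece or separator.strip():
--             result.append(piece + separator)
--     if parts[-1]:
--         result.append(parts[-1])
--     return result
-- ===== SOURCE B (Python) =====
-- def _split_by_separator(text: str, separator: str) -> list[str]: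
--     """Streaming single pass: accumulate characters into a buffer and emit the
--     buffer (separator already attached) each time it ends with the separator;
--     no str.split, no find, no reconstruction pass."""
--     if separator == "":
--         return list(text)
--     keep = bool(separator.strip())
--     result: list[str] = []
--     buf = ""
--     for ch in text:
--         buf += ch
--         if buf.endswith(separator):
--             if len(buf) > len(separator) or keep:
--                 result.append(buf)
--             buf = ""
--     if buf:
--         result.append(buf)
--     return result
-- ===== Notes on version B (the rewrite author's own statement) =====
-- stated objective: alternative
-- what changed: Replaces split-then-reconstruct (materialise the parts list with str.split, then a second pass filtering and re-attaching the separator) with a streaming one-pass character scan that accumulates a buffer and emits it whenever it ends with the separator; no split, no find, no slicing of the text.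
import Mathlib
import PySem

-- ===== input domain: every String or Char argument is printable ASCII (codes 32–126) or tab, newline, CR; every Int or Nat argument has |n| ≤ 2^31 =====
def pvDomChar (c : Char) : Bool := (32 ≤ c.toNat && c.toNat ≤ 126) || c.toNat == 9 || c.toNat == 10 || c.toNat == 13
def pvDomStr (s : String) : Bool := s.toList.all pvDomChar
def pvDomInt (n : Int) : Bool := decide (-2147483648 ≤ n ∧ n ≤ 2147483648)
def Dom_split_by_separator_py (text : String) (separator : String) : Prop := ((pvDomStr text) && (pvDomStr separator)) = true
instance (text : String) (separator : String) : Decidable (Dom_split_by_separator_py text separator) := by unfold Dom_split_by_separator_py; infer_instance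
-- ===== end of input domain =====

-- B replaces A's split-then-reconstruct with a streaming one-pass character scan that accumulates a
-- buffer and emits it whenever it ends with the separator; objective: alternative decomposition, same exact output.

-- ===== PORT A =====
-- transliteration of A: parts = text.split(separator); filtered append over parts[:-1]; then parts[-1]
def split_by_separator_py (text : String) (separator : String) : List String :=
  if separator = "" then
    text.toList.map (fun c => String.ofList [c])
  else
    let parts := PySem.Chars.splitOn text.toList separator.toList
    let result := (PySem.List.slice parts none (some (-1))).foldl
      (fun r piece =>
        if !piece.isEmpty || !(PySem.Chars.strip separator.toList).isEmpty then
          r ++ [piece ++ separator.toList]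
        else r) []
    let last := PySem.List.pyGetD parts (-1) []
    (if !last.isEmpty then result ++ [last] else result).map String.ofList

-- ===== PORT B =====
-- B's loop body: buf += ch; if buf.endswith(separator): maybe emit buf, reset buf
def bStep (sep : List Char) (keep : Bool) (st : List Char × List (List Char)) (ch : Char) :
    List Char × List (List Char) :=
  let buf := st.1 ++ [ch]
  if PySem.Chars.endswith buf sep then
    ([], if decide (sep.length < buf.length) || keep then st.2 ++ [buf] else st.2)
  else (buf, st.2)

def split_by_separator_py_alt (text : String) (separator : String) : List String :=
  match separator.toList with
  | [] => text.toList.map (fun c => String.ofList [c])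
  | s0 :: srest =>
    let sep := s0 :: srest
    let keep := !(PySem.Chars.strip sep).isEmpty
    let st := text.toList.foldl (bStep sep keep) ([], [])
    (if st.1.isEmpty then st.2 else st.2 ++ [st.1]).map String.ofList

-- ===== PRECONDITION & SPEC =====
def Spec_split_by_separator_py (text : String) (separator : String) (out : List String) : Prop := out = split_by_separator_py_alt text separator
instance (text : String) (separator : String) (out : List String) : Decidable (Spec_split_by_separator_py text separator out) := by unfold Spec_split_by_separator_py; infer_instance

-- ===== CLAIM (what is proved, stated in full; the proofs are below) =====
def Claim_equal_split_by_separator_py : Prop := ∀ (text : String) (separator : String), Dom_split_by_separator_py text separator → Spec_split_by_separator_py text separator (split_by_separator_py text separator)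

-- ===== LEMMAS AND PROOFS =====

-- structural-recursion equivalent of Python's str.split for a nonempty separator
def splitF (s0 : Char) (srest : List Char) : List Char → List (List Char)
  | [] => [[]]
  | c :: rest =>
    if (s0 :: srest).isPrefixOf (c :: rest) then
      [] :: splitF s0 srest ((c :: rest).drop (srest.length + 1))
    else
      (splitF s0 srest rest).modifyHead (c :: ·)
termination_by l => l.length
decreasing_by
  · simp only [List.drop_succ_cons, List.length_drop, List.length_cons]; omega
  · simp

theorem splitF_ne_nil (s0 : Char) (srest : List Char) (l : List Char) :
    splitF s0 srest l ≠ [] := by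
  induction l using splitF.induct s0 srest with
  | case1 => simp [splitF]
  | case2 c rest h ih => simp [splitF, h]
  | case3 c rest h ih =>
    simp only [splitF, if_neg h]
    cases hs : splitF s0 srest rest with
    | nil => exact absurd hs ih
    | cons p ps => simp

theorem goLem (s0 : Char) (srest : List Char) :
    ∀ (fuel : Nat) (l cur : List Char) (acc : List (List Char)), l.length < fuel →
    PySem.Chars.splitOn.go (s0 :: srest) fuel l cur acc
      = acc.reverse ++ (splitF s0 srest l).modifyHead (cur.reverse ++ ·) := by
  intro fuel
  induction fuel with
  | zero => intro l cur acc h; omega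
  | succ f ih =>
    intro l cur acc h
    match l with
    | [] =>
      rw [PySem.Chars.splitOn.go.eq_def]
      simp [splitF]
    | c :: rest =>
      rw [PySem.Chars.splitOn.go.eq_def]
      by_cases hp : (s0 :: srest).isPrefixOf (c :: rest)
      · simp only [hp, if_true]
        have hlen : (List.drop (s0 :: srest).length (c :: rest)).length < f := by
          simp only [List.length_drop, List.length_cons] at *
          omega
        rw [ih _ _ _ hlen]
        rw [show splitF s0 srest (c :: rest)
              = [] :: splitF s0 srest ((c :: rest).drop (srest.length + 1)) by
            rw [splitF]; rw [if_pos hp]]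
        simp only [List.length_cons, List.drop_succ_cons, List.reverse_cons,
          List.modifyHead_cons, List.append_assoc, List.singleton_append,
          List.append_nil]
        cases hs : splitF s0 srest (List.drop srest.length rest) with
        | nil => exact absurd hs (splitF_ne_nil s0 srest _)
        | cons p ps => simp
      · simp only [hp, if_false, Bool.false_eq_true]
        have hlen : rest.length < f := by simp at h; omega
        rw [ih _ _ _ hlen]
        rw [show splitF s0 srest (c :: rest)
              = (splitF s0 srest rest).modifyHead (c :: ·) by
            rw [splitF]; rw [if_neg hp]]
        cases hs : splitF s0 srest rest with
        | nil => exact absurd hs (splitF_ne_nil s0 srest rest)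
        | cons p ps => simp

theorem splitOn_eq_splitF (s0 : Char) (srest : List Char) (l : List Char) :
    PySem.Chars.splitOn l (s0 :: srest) = splitF s0 srest l := by
  rw [PySem.Chars.splitOn]
  rw [goLem s0 srest (l.length + 1) l [] [] (by omega)]
  cases hs : splitF s0 srest l with
  | nil => exact absurd hs (splitF_ne_nil s0 srest l)
  | cons p ps => simp

-- sub occurs first at index i (prefix at i, nowhere earlier) → find = i
theorem find_eq_of_first (sub l : List Char) (i : Nat)
    (hp : sub <+: l.drop i) (hmin : ∀ j : Nat, j < i → ¬ sub <+: l.drop j) :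
    PySem.Chars.find l sub = (i : Int) := by
  have hinf : sub <:+: l := hp.isInfix.trans (List.drop_suffix i l).isInfix
  have hnn : 0 ≤ PySem.Chars.find l sub := (PySem.Chars.find_nonneg_iff _ _).mpr hinf
  obtain ⟨hfp, hfmin⟩ := PySem.Chars.find_spec hnn
  have : (PySem.Chars.find l sub).toNat = i := by
    rcases Nat.lt_trichotomy (PySem.Chars.find l sub).toNat i with hlt | heq | hgt
    · exact absurd hfp (hmin _ hlt)
    · exact heq
    · exact absurd hp (hfmin i hgt)
  omega

theorem find_eq_zero_of_prefix (sub l : List Char) (hp : sub <+: l) :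
    PySem.Chars.find l sub = 0 :=
  find_eq_of_first sub l 0 (by simpa using hp) (by omega)

theorem splitF_of_find_neg (s0 : Char) (srest : List Char) (l : List Char)
    (h : PySem.Chars.find l (s0 :: srest) = -1) : splitF s0 srest l = [l] := by
  induction l using splitF.induct s0 srest with
  | case1 => simp [splitF]
  | case2 c rest hp ih =>
    have : PySem.Chars.find (c :: rest) (s0 :: srest) = 0 :=
      find_eq_zero_of_prefix _ _ (List.isPrefixOf_iff_prefix.mp hp)
    omega
  | case3 c rest hp ih =>
    have hni : ¬ (s0 :: srest) <:+: (c :: rest) := (PySem.Chars.find_eq_neg_one_iff _ _).mp h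
    have hr : PySem.Chars.find rest (s0 :: srest) = -1 := by
      rw [PySem.Chars.find_eq_neg_one_iff _ _]
      intro hinf
      exact hni (hinf.trans (List.suffix_cons c rest).isInfix)
    rw [splitF, if_neg hp, ih hr]
    simp

theorem splitF_of_find_nat (s0 : Char) (srest : List Char) (l : List Char) (i : Nat)
    (h : PySem.Chars.find l (s0 :: srest) = (i : Int)) :
    splitF s0 srest l =
      l.take i :: splitF s0 srest (l.drop (i + (srest.length + 1))) := by
  induction l using splitF.induct s0 srest generalizing i with
  | case1 =>
    exfalso
    have : PySem.Chars.find [] (s0 :: srest) = -1 := by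
      rw [PySem.Chars.find_eq_neg_one_iff _ _]
      intro hinf
      exact absurd (List.eq_nil_of_infix_nil hinf) (by simp)
    omega
  | case2 c rest hp ih =>
    have h0 : PySem.Chars.find (c :: rest) (s0 :: srest) = 0 :=
      find_eq_zero_of_prefix _ _ (List.isPrefixOf_iff_prefix.mp hp)
    have hi : i = 0 := by omega
    subst hi
    rw [splitF, if_pos hp]
    simp
  | case3 c rest hp ih =>
    have hpp : ¬ (s0 :: srest) <+: (c :: rest) := fun hc =>
      hp (List.isPrefixOf_iff_prefix.mpr hc)
    have hnn : 0 ≤ PySem.Chars.find (c :: rest) (s0 :: srest) := by omega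
    obtain ⟨hfp, hfmin⟩ := PySem.Chars.find_spec hnn
    have htn : (PySem.Chars.find (c :: rest) (s0 :: srest)).toNat = i := by omega
    rw [htn] at hfp hfmin
    have hi0 : i ≠ 0 := by
      rintro rfl
      exact hpp (by simpa using hfp)
    obtain ⟨i', rfl⟩ : ∃ i', i = i' + 1 := ⟨i - 1, by omega⟩
    have hr : PySem.Chars.find rest (s0 :: srest) = (i' : Int) := by
      apply find_eq_of_first
      · simpa [List.drop_succ_cons] using hfp
      · intro j hj hpre
        exact hfmin (j + 1) (by omega) (by simpa [List.drop_succ_cons] using hpre)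
    rw [splitF, if_neg hp, ih i' hr]
    simp only [List.modifyHead_cons, List.take_succ_cons]
    congr 2
    rw [show i' + 1 + (srest.length + 1) = (i' + (srest.length + 1)) + 1 by omega]
    rw [List.drop_succ_cons]

-- A's emitting pass over the parts list (exactly A's shape after slice -> dropLast)
def aEmit (sep : List Char) (keep : Bool) (parts : List (List Char)) : List (List Char) :=
  let result := parts.dropLast.foldl
    (fun r piece => if !piece.isEmpty || keep then r ++ [piece ++ sep] else r) []
  let last := PySem.List.pyGetD parts (-1) []
  if !last.isEmpty then result ++ [last] else result

theorem foldl_emit (sep : List Char) (keep : Bool) :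
    ∀ (l : List (List Char)) (r : List (List Char)),
    l.foldl (fun r piece => if !piece.isEmpty || keep then r ++ [piece ++ sep] else r) r
      = r ++ l.foldl (fun r piece => if !piece.isEmpty || keep then r ++ [piece ++ sep] else r) [] := by
  intro l
  induction l with
  | nil => simp
  | cons p ps ih =>
    intro r
    simp only [List.foldl_cons]
    rw [ih, ih (if !p.isEmpty || keep then [] ++ [p ++ sep] else [])]
    by_cases hc : (!p.isEmpty || keep) = true <;> simp [hc]

theorem aEmit_single (sep : List Char) (keep : Bool) (l : List Char) :
    aEmit sep keep [l] = if l.isEmpty then [] else [l] := by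
  rw [aEmit]
  rw [PySem.List.pyGetD_neg_one _ _ (by simp : ([l] : List (List Char)) ≠ [])]
  by_cases hl : l.isEmpty <;> simp [hl]

theorem aEmit_cons (sep : List Char) (keep : Bool) (p : List Char)
    (parts : List (List Char)) (h : parts ≠ []) :
    aEmit sep keep (p :: parts)
      = (if !p.isEmpty || keep then [p ++ sep] else []) ++ aEmit sep keep parts := by
  rw [aEmit, aEmit]
  rw [PySem.List.pyGetD_neg_one _ _ (by simp : (p :: parts) ≠ [])]
  rw [PySem.List.pyGetD_neg_one _ _ h]
  rw [List.getLast_cons h]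
  rw [List.dropLast_cons_of_ne_nil h]
  simp only [List.foldl_cons]
  rw [foldl_emit]
  by_cases hc : (!p.isEmpty || keep) = true <;>
    by_cases hl : (parts.getLast h).isEmpty <;> simp [hc, hl]

-- an occurrence of sep in buf ++ [c] is either inside buf or a suffix of buf ++ [c]
theorem infix_concat_cases (sep buf : List Char) (c : Char)
    (h : sep <:+: buf ++ [c]) : sep <:+: buf ∨ sep <:+ buf ++ [c] := by
  obtain ⟨s, t, hst⟩ := h
  rcases t.eq_nil_or_concat with rfl | ⟨t', d, rfl⟩
  · right
    exact ⟨s, by simpa using hst⟩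
  · left
    have hb : (s ++ sep ++ t') ++ [d] = buf ++ [c] := by simpa [List.append_assoc] using hst
    have := congrArg List.dropLast hb
    simp only [List.dropLast_concat] at this
    exact ⟨s, t', this⟩

-- B's fold-plus-finalise over the remaining characters
def bRun (sep : List Char) (keep : Bool) (buf : List Char) (acc : List (List Char))
    (l : List Char) : List (List Char) :=
  let st := l.foldl (bStep sep keep) (buf, acc)
  if st.1.isEmpty then st.2 else st.2 ++ [st.1]

theorem bMain (s0 : Char) (srest : List Char) (keep : Bool) :
    ∀ (l buf : List Char) (acc : List (List Char)), ¬ (s0 :: srest) <:+: buf →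
    bRun (s0 :: srest) keep buf acc l
      = acc ++ aEmit (s0 :: srest) keep (splitF s0 srest (buf ++ l)) := by
  intro l
  induction l with
  | nil =>
    intro buf acc hni
    have hneg : PySem.Chars.find buf (s0 :: srest) = -1 :=
      (PySem.Chars.find_eq_neg_one_iff _ _).mpr hni
    rw [bRun]
    simp only [List.foldl_nil, List.append_nil]
    rw [splitF_of_find_neg s0 srest buf hneg, aEmit_single]
    by_cases hb : buf.isEmpty <;> simp [hb]
  | cons c rest ih =>
    intro buf acc hni
    rw [bRun]
    simp only [List.foldl_cons]
    by_cases hs : PySem.Chars.endswith (buf ++ [c]) (s0 :: srest) = true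
    · -- buffer ends with the separator: emit and reset
      have hsfx : (s0 :: srest) <:+ buf ++ [c] := (PySem.Chars.endswith_iff _ _).mp hs
      obtain ⟨p, hp⟩ := hsfx
      have hplen : p.length + (srest.length + 1) = buf.length + 1 := by
        have := congrArg List.length hp
        simp at this
        omega
      -- the separator's first occurrence in buf ++ [c] ++ rest starts at p.length
      have hfind : PySem.Chars.find ((buf ++ [c]) ++ rest) (s0 :: srest) = (p.length : Int) := by
        apply find_eq_of_first
        · rw [← hp, List.append_assoc, List.drop_left]
          exact ⟨rest, rfl⟩
        · intro j hj hpre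
          apply hni
          have hjm : j + (srest.length + 1) ≤ buf.length := by omega
          have hsepeq : s0 :: srest = (((buf ++ [c]) ++ rest).drop j).take (srest.length + 1) := by
            have := List.prefix_iff_eq_take.mp hpre
            simpa using this
          have hd : ((buf ++ [c]) ++ rest).drop j = buf.drop j ++ ([c] ++ rest) := by
            rw [List.append_assoc, List.drop_append_of_le_length (by omega)]
          rw [hd, List.take_append_of_le_length (by simp; omega)] at hsepeq
          rw [hsepeq]
          exact (List.take_prefix _ _).isInfix.trans (List.drop_suffix j buf).isInfix
      have hsplit : splitF s0 srest ((buf ++ [c]) ++ rest) = p :: splitF s0 srest rest := by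
        rw [splitF_of_find_nat s0 srest _ p.length hfind]
        congr 1
        · rw [← hp, List.append_assoc, List.take_left]
        · rw [← hp, List.append_assoc,
            show p.length + (srest.length + 1) = (p ++ (s0 :: srest)).length by simp,
            ← List.append_assoc, List.drop_left]
      have hstep : bStep (s0 :: srest) keep (buf, acc) c
          = ([], if decide ((s0 :: srest).length < (buf ++ [c]).length) || keep
                 then acc ++ [buf ++ [c]] else acc) := by
        simp [bStep, hs]
      have ihh := ih []
        (if decide ((s0 :: srest).length < (buf ++ [c]).length) || keep
         then acc ++ [buf ++ [c]] else acc)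
        (by intro h; exact absurd (List.eq_nil_of_infix_nil h) (by simp))
      rw [bRun] at ihh
      simp only [List.nil_append] at ihh
      rw [hstep, ihh]
      rw [show buf ++ c :: rest = (buf ++ [c]) ++ rest by simp, hsplit,
        aEmit_cons _ _ _ _ (splitF_ne_nil s0 srest rest)]
      rcases List.eq_nil_or_concat p with h0 | ⟨q, d, rfl⟩
      · subst h0
        simp only [List.nil_append] at hp
        have hlen0 : ¬ (s0 :: srest).length < (buf ++ [c]).length := by
          have := congrArg List.length hp
          simp at this ⊢
          omega
        simp only [decide_eq_false hlen0, List.isEmpty_nil, Bool.not_true, Bool.false_or]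
        cases keep <;> simp [← hp]
      · have hlen1 : (s0 :: srest).length < (buf ++ [c]).length := by
          have := congrArg List.length hp
          simp at this ⊢
          omega
        rw [decide_eq_true hlen1]
        simp only [Bool.true_or]
        simp [← hp, List.append_assoc]
    · -- no separator at the end of the buffer: keep accumulating
      have hni' : ¬ (s0 :: srest) <:+: buf ++ [c] := by
        intro hinf
        rcases infix_concat_cases _ _ _ hinf with h1 | h2
        · exact hni h1
        · exact hs ((PySem.Chars.endswith_iff _ _).mpr h2)
      have := ih (buf ++ [c]) acc hni'
      rw [bRun] at this
      simp only [bStep, hs, if_false, Bool.false_eq_true] at *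
      rw [show buf ++ c :: rest = (buf ++ [c]) ++ rest by simp]
      exact this

-- ===== VERDICT (by name: the statement is the Claim_ definition above) =====
theorem split_by_separator_py_spec : Claim_equal_split_by_separator_py := by
  intro text separator _
  unfold Spec_split_by_separator_py
  cases hsep : separator.toList with
  | nil =>
    have h0 : separator = "" := by
      have := congrArg String.ofList hsep
      simpa using this
    subst h0
    simp [split_by_separator_py, split_by_separator_py_alt]
  | cons s0 srest =>
    have hne : separator ≠ "" := by
      intro h0; rw [h0] at hsep; simp at hsep
    rw [split_by_separator_py, if_neg hne]
    simp only [split_by_separator_py_alt, hsep]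
    simp only [PySem.List.slice_to_neg_one]
    rw [splitOn_eq_splitF s0 srest text.toList]
    have := bMain s0 srest (!(PySem.Chars.strip (s0 :: srest)).isEmpty)
      text.toList [] [] (by intro h; exact absurd (List.eq_nil_of_infix_nil h) (by simp))
    rw [bRun] at this
    simp only [List.nil_append] at this
    congr 1
    rw [this]
    simp only [aEmit]
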